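-- pv_equiv track=rewrite | github.com/Akiwork1252/my_study_app | ai_support/auxiliary_functions.py | format_question_output
-- ===== SOURCE A (Python) =====
-- def format_question_output(ai_output):
--     lines = ai_output.split(' ')
--     formatted_output = []
--     buffer = []
--
--     for word in lines:
--         buffer.append(word)
--         if word.endswith(':') or word.endswith(')'):
--             formatted_output.append(' '.join(buffer))
--             buffer = []
--
--     if buffer:
--         formatted_output.append(' '.join(buffer))
--
--     return '\n'.join(formatted_output)
-- ===== SOURCE B (Python) =====
-- def format_question_output(ai_output):
--     out = []
--     i = 0
--     n = len(ai_output)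
--     while i < n:
--         c = ai_output[i]
--         if c in ':)' and i + 1 < n and ai_output[i + 1] == ' ':
--             out.append(c)
--             out.append('\n')
--             i += 2
--         else:
--             out.append(c)
--             i += 1
--     return ''.join(out)
-- ===== Notes on version B (the rewrite author's own statement) =====
-- stated objective: simpler
-- what changed: Replaced the split-into-words / buffer-and-regroup / double-join pipeline by a single left-to-right character scan that copies the string while turning each space directly preceded by ':' or ')' into a newline.
import Mathlib
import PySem

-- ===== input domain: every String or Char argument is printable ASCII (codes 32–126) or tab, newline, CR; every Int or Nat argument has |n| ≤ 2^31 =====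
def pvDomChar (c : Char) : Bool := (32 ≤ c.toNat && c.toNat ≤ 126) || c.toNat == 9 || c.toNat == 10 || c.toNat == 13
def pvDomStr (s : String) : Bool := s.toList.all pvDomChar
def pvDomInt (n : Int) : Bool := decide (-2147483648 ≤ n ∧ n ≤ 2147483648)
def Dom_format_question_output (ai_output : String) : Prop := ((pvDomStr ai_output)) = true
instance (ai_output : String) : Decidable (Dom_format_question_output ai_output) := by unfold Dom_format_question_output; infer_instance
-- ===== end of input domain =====

-- B rebuilds the string in one character scan, turning each space that directly follows ':' or ')'
-- into a newline, instead of splitting into words and regrouping them (objective: simpler).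

-- ===== PORT A =====
-- literal transliteration of A: split on ' ', fold with (formatted_output, buffer), flush, join with '\n'
def format_question_output (ai_output : String) : String :=
  let lines := PySem.Chars.splitOn ai_output.toList [' ']
  let st := lines.foldl
    (fun (st : List (List Char) × List (List Char)) word =>
      let buffer := st.2 ++ [word]
      if PySem.Chars.endswith word [':'] || PySem.Chars.endswith word [')'] then
        (st.1 ++ [PySem.Chars.join [' '] buffer], [])
      else
        (st.1, buffer))
    ([], [])
  let formatted := if st.2.isEmpty then st.1 else st.1 ++ [PySem.Chars.join [' '] st.2]
  String.ofList (PySem.Chars.join ['\n'] formatted)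

-- ===== PORT B =====
-- Source B's scan: emit the current char; when it is ':' or ')' and the next char is ' ',
-- emit '\n' instead of that space and skip both.
def pvScan : List Char → List Char
  | [] => []
  | [c] => [c]
  | c :: d :: rest =>
    if (c = ':' || c = ')') && d = ' ' then c :: '\n' :: pvScan rest
    else c :: pvScan (d :: rest)

def format_question_output_alt (ai_output : String) : String :=
  String.ofList (pvScan ai_output.toList)

-- ===== PRECONDITION & SPEC =====
def Spec_format_question_output (ai_output : String) (out : String) : Prop := out = format_question_output_alt ai_output
instance (ai_output : String) (out : String) : Decidable (Spec_format_question_output ai_output out) := by unfold Spec_format_question_output; infer_instance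

-- ===== CLAIM (what is proved, stated in full; the proofs are below) =====
def Claim_equal_format_question_output : Prop := ∀ (ai_output : String), Dom_format_question_output ai_output → Spec_format_question_output ai_output (format_question_output ai_output)

-- ===== LEMMAS AND PROOFS =====

-- a word ends with ':' or ')'
def pvEnds (w : List Char) : Bool := PySem.Chars.endswith w [':'] || PySem.Chars.endswith w [')']

-- direct recursive form of Python's str.split(' ')
def pvSplit (cur : List Char) : List Char → List (List Char)
  | [] => [cur]
  | c :: rest => if c = ' ' then cur :: pvSplit [] rest else pvSplit (cur ++ [c]) rest

-- the groups A's loop produces, given the current buffer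
def pvGroups (buf : List (List Char)) : List (List Char) → List (List Char)
  | [] => if buf.isEmpty then [] else [PySem.Chars.join [' '] buf]
  | w :: ws =>
    if pvEnds w then PySem.Chars.join [' '] (buf ++ [w]) :: pvGroups [] ws
    else pvGroups (buf ++ [w]) ws

-- A's output as a direct recursion over the word list
def pvFlat : List (List Char) → List Char
  | [] => []
  | [w] => w
  | w :: ws@(_ :: _) => w ++ (if pvEnds w then '\n' else ' ') :: pvFlat ws

-- intercalate helpers
theorem join_cons_ne (sep : List Char) (x : List Char) (xs : List (List Char)) (h : xs ≠ []) :
    PySem.Chars.join sep (x :: xs) = x ++ sep ++ PySem.Chars.join sep xs := by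
  cases xs with
  | nil => exact absurd rfl h
  | cons y ys => simp [PySem.Chars.join, List.intercalate, List.intersperse]

theorem pvSplit_go (fuel : Nat) : ∀ (l cur : List Char) (acc : List (List Char)),
    l.length < fuel →
    PySem.Chars.splitOn.go [' '] fuel l cur acc = acc.reverse ++ pvSplit cur.reverse l := by
  induction fuel with
  | zero => intro l cur acc h; omega
  | succ fuel ih =>
    intro l cur acc h
    cases l with
    | nil => simp [PySem.Chars.splitOn.go, pvSplit]
    | cons c rest =>
      rw [PySem.Chars.splitOn.go]
      by_cases hc : c = ' '
      · rw [if_pos (by simp [List.isPrefixOf, hc])]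
        simp only [List.length_cons, Nat.add_lt_add_iff_right] at h
        simp only [List.length_cons, List.length_nil, List.drop_succ_cons, List.drop_zero]
        rw [ih rest [] (cur.reverse :: acc) (by omega)]
        simp [pvSplit, hc]
      · rw [if_neg (by simp [List.isPrefixOf]; intro hh; exact absurd hh.symm hc)]
        simp only [List.length_cons, Nat.add_lt_add_iff_right] at h
        rw [ih rest (c :: cur) acc (by omega)]
        simp [pvSplit, hc]

theorem splitOn_eq_pvSplit (s : List Char) :
    PySem.Chars.splitOn s [' '] = pvSplit [] s := by
  unfold PySem.Chars.splitOn
  rw [pvSplit_go (s.length + 1) s [] [] (by omega)]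
  rfl

theorem pvSplit_no_space (l : List Char) : ∀ (cur : List Char), ' ' ∉ cur →
    ∀ w ∈ pvSplit cur l, ' ' ∉ w := by
  induction l with
  | nil => intro cur h w hw; simp [pvSplit] at hw; simpa [hw] using h
  | cons c rest ih =>
    intro cur h w hw
    simp only [pvSplit] at hw
    by_cases hc : c = ' '
    · simp [hc] at hw
      rcases hw with hw | hw
      · simpa [hw] using h
      · exact ih [] (by simp) w hw
    · rw [if_neg hc] at hw
      exact ih (cur ++ [c]) (by simp [h, Ne.symm hc]) w hw

theorem pvSplit_ne_nil (l : List Char) (cur : List Char) : pvSplit cur l ≠ [] := by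
  cases l with
  | nil => simp [pvSplit]
  | cons c rest =>
    simp only [pvSplit]
    split
    · simp
    · exact pvSplit_ne_nil rest (cur ++ [c])

theorem join_singleton' (sep x : List Char) : PySem.Chars.join sep [x] = x := by
  simp [PySem.Chars.join, List.intercalate]

theorem pvSplit_join (l : List Char) : ∀ (cur : List Char),
    PySem.Chars.join [' '] (pvSplit cur l) = cur ++ l := by
  induction l with
  | nil => intro cur; simp [pvSplit]
  | cons c rest ih =>
    intro cur
    simp only [pvSplit]
    by_cases hc : c = ' '
    · rw [if_pos hc, join_cons_ne _ _ _ (pvSplit_ne_nil rest []), ih []]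
      simp [hc]
    · rw [if_neg hc, ih (cur ++ [c])]
      simp

theorem pvGroups_ne_nil (ws : List (List Char)) : ∀ (buf : List (List Char)),
    buf ≠ [] ∨ ws ≠ [] → pvGroups buf ws ≠ [] := by
  induction ws with
  | nil =>
    intro buf h
    rcases h with h | h
    · simp [pvGroups, List.isEmpty_eq_false_iff.mpr h]
    · exact absurd rfl h
  | cons w ws ih =>
    intro buf _
    simp only [pvGroups]
    split
    · simp
    · exact ih (buf ++ [w]) (Or.inl (by simp))

theorem joinSp_append_singleton (buf : List (List Char)) (w : List Char) (h : buf ≠ []) :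
    PySem.Chars.join [' '] (buf ++ [w]) = PySem.Chars.join [' '] buf ++ ' ' :: w := by
  induction buf with
  | nil => exact absurd rfl h
  | cons b bs ih =>
    cases bs with
    | nil => simp [join_cons_ne _ _ [w] (by simp)]
    | cons b2 bs2 =>
      rw [List.cons_append, join_cons_ne _ _ _ (by simp), join_cons_ne _ _ _ (by simp),
        ih (by simp)]
      simp

theorem joinN_pvGroups (ws : List (List Char)) : ∀ (buf : List (List Char)),
    PySem.Chars.join ['\n'] (pvGroups buf ws) =
      if buf.isEmpty then pvFlat ws
      else PySem.Chars.join [' '] buf ++ (if ws.isEmpty then [] else ' ' :: pvFlat ws) := by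
  induction ws with
  | nil =>
    intro buf
    cases buf with
    | nil => simp [pvGroups, pvFlat]
    | cons b bs => simp [pvGroups]
  | cons w ws ih =>
    intro buf
    simp only [pvGroups]
    by_cases hend : pvEnds w = true
    · rw [if_pos hend]
      cases ws with
      | nil =>
        have : pvGroups [] ([] : List (List Char)) = [] := by simp [pvGroups]
        rw [this, join_singleton']
        cases buf with
        | nil => simp [pvFlat]
        | cons b bs =>
          rw [joinSp_append_singleton _ _ (by simp)]
          simp [pvFlat]
      | cons w2 ws2 =>
        rw [join_cons_ne _ _ _ (pvGroups_ne_nil _ [] (Or.inr (by simp))), ih []]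
        simp only [List.isEmpty_nil]
        cases buf with
        | nil => simp [pvFlat, hend]
        | cons b bs =>
          rw [joinSp_append_singleton _ _ (by simp)]
          simp [pvFlat, hend]
    · rw [if_neg hend]
      rw [ih (buf ++ [w])]
      rw [if_neg (by simp)]
      cases buf with
      | nil =>
        simp only [List.nil_append, join_singleton']
        cases ws with
        | nil => simp [pvFlat]
        | cons w2 ws2 => simp [pvFlat, hend]
      | cons b bs =>
        rw [joinSp_append_singleton _ _ (by simp)]
        cases ws with
        | nil => simp [pvFlat]
        | cons w2 ws2 => simp [pvFlat, hend]

theorem foldl_pvGroups (ws : List (List Char)) : ∀ (F buf : List (List Char)),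
    (let st := ws.foldl
      (fun (st : List (List Char) × List (List Char)) word =>
        let buffer := st.2 ++ [word]
        if PySem.Chars.endswith word [':'] || PySem.Chars.endswith word [')'] then
          (st.1 ++ [PySem.Chars.join [' '] buffer], [])
        else (st.1, buffer)) (F, buf)
     if st.2.isEmpty then st.1 else st.1 ++ [PySem.Chars.join [' '] st.2])
    = F ++ pvGroups buf ws := by
  induction ws with
  | nil =>
    intro F buf
    simp only [List.foldl_nil, pvGroups]
    cases buf with
    | nil => simp
    | cons b bs => simp
  | cons w ws ih =>
    intro F buf
    simp only [List.foldl_cons, pvGroups]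
    by_cases hend : pvEnds w = true
    · have hc : (PySem.Chars.endswith w [':'] || PySem.Chars.endswith w [')']) = true := hend
      rw [if_pos hc, if_pos hend, ih (F ++ [PySem.Chars.join [' '] (buf ++ [w])]) []]
      simp
    · have hc : ¬ ((PySem.Chars.endswith w [':'] || PySem.Chars.endswith w [')']) = true) := hend
      rw [if_neg hc, if_neg hend, ih F (buf ++ [w])]

-- pvEnds facts
theorem pvEnds_nil : pvEnds [] = false := by decide

theorem pvEnds_singleton (c : Char) : pvEnds [c] = (c = ':' || c = ')') := by
  simp only [pvEnds, PySem.Chars.endswith, List.isSuffixOf, List.reverse_singleton,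
    List.isPrefixOf, Bool.and_true]
  rw [Bool.eq_iff_iff]
  simp only [Bool.or_eq_true, beq_iff_eq, decide_eq_true_eq]
  constructor
  · rintro (h | h) <;> simp [h.symm]
  · rintro (h | h) <;> simp [h]

theorem pvEnds_cons (c : Char) (w : List Char) (h : w ≠ []) : pvEnds (c :: w) = pvEnds w := by
  have key : ∀ x : Char, PySem.Chars.endswith (c :: w) [x] = PySem.Chars.endswith w [x] := by
    intro x
    rw [Bool.eq_iff_iff, PySem.Chars.endswith_iff, PySem.Chars.endswith_iff,
      List.suffix_cons_iff]
    constructor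
    · rintro (hcw | hcw)
      · cases w with
        | nil => exact absurd rfl h
        | cons a as => simp at hcw
      · exact hcw
    · exact Or.inr
  simp [pvEnds, key]

-- pvScan step lemmas
theorem pvScan_space (t : List Char) : pvScan (' ' :: t) = ' ' :: pvScan t := by
  cases t with
  | nil => rfl
  | cons d r => simp [pvScan]

theorem pvScan_cons_cons (c d : Char) (r : List Char) :
    pvScan (c :: d :: r) =
      if (c = ':' || c = ')') && d = ' ' then c :: '\n' :: pvScan r
      else c :: pvScan (d :: r) := rfl

theorem pvScan_word (w : List Char) : ∀ (t : List Char), ' ' ∉ w →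
    (t.head? = some ' ' → pvEnds w = false) →
    pvScan (w ++ t) = w ++ pvScan t := by
  induction w with
  | nil => intro t _ _; rfl
  | cons c w' ih =>
    intro t hsp hb
    have hsp' : ' ' ∉ w' := fun hh => hsp (List.mem_cons_of_mem _ hh)
    cases w' with
    | nil =>
      cases t with
      | nil => rfl
      | cons d r =>
        have hcond : ¬ (((c = ':' || c = ')') && d = ' ') = true) := by
          by_cases hd : d = ' '
          · have hend := hb (by simp [hd])
            rw [pvEnds_singleton] at hend
            simp [hd, hend]
          · simp [hd]
        rw [List.singleton_append, pvScan_cons_cons, if_neg hcond, List.singleton_append]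
    | cons e w'' =>
      have he : ¬ e = ' ' := fun hh => hsp' (by simp [hh])
      rw [List.cons_append, List.cons_append, pvScan_cons_cons, if_neg (by simp [he]),
        ← List.cons_append]
      have hb' : t.head? = some ' ' → pvEnds (e :: w'') = false := by
        intro hh
        rw [← pvEnds_cons c _ (by simp)]
        exact hb hh
      rw [ih t hsp' hb']
      simp

theorem pvScan_flush (w : List Char) : ∀ (t : List Char), ' ' ∉ w → pvEnds w = true →
    pvScan (w ++ ' ' :: t) = w ++ '\n' :: pvScan t := by
  induction w with
  | nil => intro t _ he; rw [pvEnds_nil] at he; exact absurd he (by simp)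
  | cons c w' ih =>
    intro t hsp he
    have hsp' : ' ' ∉ w' := fun hh => hsp (List.mem_cons_of_mem _ hh)
    cases w' with
    | nil =>
      rw [pvEnds_singleton] at he
      rw [List.singleton_append, pvScan_cons_cons, if_pos (by simp_all)]
      rfl
    | cons e w'' =>
      have he' : pvEnds (e :: w'') = true := by rwa [pvEnds_cons c _ (by simp)] at he
      have hee : ¬ e = ' ' := fun hh => hsp' (by simp [hh])
      rw [List.cons_append, List.cons_append, pvScan_cons_cons, if_neg (by simp [hee]),
        ← List.cons_append, ih t hsp' he']
      simp

theorem pvScan_joinSp (ws : List (List Char)) (h : ∀ w ∈ ws, ' ' ∉ w) :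
    pvScan (PySem.Chars.join [' '] ws) = pvFlat ws := by
  induction ws with
  | nil => simp [PySem.Chars.join, List.intercalate, pvFlat, pvScan]
  | cons w ws ih =>
    have hw : ' ' ∉ w := h w (by simp)
    have hws : ∀ v ∈ ws, ' ' ∉ v := fun v hv => h v (by simp [hv])
    cases ws with
    | nil =>
      rw [join_singleton', pvFlat]
      have := pvScan_word w [] hw (by simp)
      simpa [pvScan] using this
    | cons w2 ws2 =>
      rw [join_cons_ne _ _ _ (by simp), pvFlat]
      by_cases hend : pvEnds w = true
      · rw [if_pos hend]
        rw [List.append_assoc, List.singleton_append, pvScan_flush w _ hw hend,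
          ih hws]
      · rw [if_neg hend]
        rw [List.append_assoc, List.singleton_append,
          pvScan_word w _ hw (fun _ => Bool.eq_false_iff.mpr hend), pvScan_space, ih hws]

-- ===== VERDICT (by name: the statement is the Claim_ definition above) =====
theorem format_question_output_spec : Claim_equal_format_question_output := by
  intro s _
  unfold Spec_format_question_output format_question_output format_question_output_alt
  simp only [splitOn_eq_pvSplit]
  rw [foldl_pvGroups]
  simp only [List.nil_append]
  rw [joinN_pvGroups]
  have hj : PySem.Chars.join [' '] (pvSplit [] s.toList) = s.toList := by
    simpa using pvSplit_join s.toList []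
  have hs : pvFlat (pvSplit [] s.toList) = pvScan s.toList := by
    conv_rhs => rw [← hj]
    rw [pvScan_joinSp _ (pvSplit_no_space s.toList [] (by simp))]
  simp [hs]
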